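-- pv_equiv track=rewrite | github.com/hmk252/ARC-9th-place | src/arc_2020_ensemble_26_solutions.py | Rotate180Sym_Eq
-- ===== SOURCE A (Python) =====
-- def Rotate180Sym_Eq(x, Param):
--
--     n = len(x)
--     k = len(x[0])
--     r, s = Param
--
--     Ans = []
--
--     for i in range(n):
--         for j in range(k):
--             i1 = r - i
--             j1 = s - j
--             if i1 < 0 or i1 >= n or j1 < 0 or j1 >= k:
--                 continue
--             a = (i, j)
--             b = (i1, j1)
--             if [a, b] in Ans or [b, a] in Ans or a == b:
--                 continue
--             Ans.append([a, b])
--     return Ans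
-- ===== SOURCE B (Python) =====
-- def Rotate180Sym_Eq(x, Param):
--     n = len(x)
--     k = len(x[0])
--     r, s = Param
--     # The 180-degree map p -> (r-i, s-j) is an involution, so each valid pair
--     # is seen exactly twice (once from each end) and once when a == b; keeping
--     # only the lexicographically smaller endpoint reproduces A's dedup order
--     # without any membership scans over the growing result.
--     return [[(i, j), (r - i, s - j)]
--             for i in range(n) for j in range(k)
--             if 0 <= r - i < n and 0 <= s - j < k and (i, j) < (r - i, s - j)]
-- ===== Notes on version B (the rewrite author's own statement) =====
-- stated objective: simpler
-- what changed: Replaced the growing-list membership scans ('[a,b] in Ans or [b,a] in Ans or a==b') by a local canonical-ordering test (i,j)<(r-i,s-j), valid because the 180-degree map is an involution; the result is built in a single comprehension with no auxiliary lookup structure.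
import Mathlib
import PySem

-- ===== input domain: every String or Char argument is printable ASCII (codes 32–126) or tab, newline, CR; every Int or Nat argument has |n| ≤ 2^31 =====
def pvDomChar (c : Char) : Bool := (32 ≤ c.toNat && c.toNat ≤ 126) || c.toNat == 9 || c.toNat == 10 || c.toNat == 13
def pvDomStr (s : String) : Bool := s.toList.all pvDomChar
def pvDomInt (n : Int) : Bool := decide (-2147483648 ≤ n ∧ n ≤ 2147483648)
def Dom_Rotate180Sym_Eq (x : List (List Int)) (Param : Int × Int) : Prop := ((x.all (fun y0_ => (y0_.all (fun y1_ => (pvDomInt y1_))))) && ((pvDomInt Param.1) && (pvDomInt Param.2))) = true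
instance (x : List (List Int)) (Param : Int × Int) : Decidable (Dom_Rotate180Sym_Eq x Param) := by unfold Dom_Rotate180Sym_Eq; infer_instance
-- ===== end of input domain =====

-- B replaces A's membership scans over the growing result list by a local
-- canonical-ordering test (the 180-degree map is an involution), one pass, same output.

-- ===== PORT A =====
def Rotate180Sym_Eq (x : List (List Int)) (Param : Int × Int) : List (List (Int × Int)) :=
  let n : Int := x.length
  let k : Int := ((PySem.List.pyGet? x 0).getD []).length   -- x[0]; Pre_ excludes x = [] where Python raises IndexError
  let r : Int := Param.1
  let s : Int := Param.2
  (PySem.List.pyRange 0 n 1).foldl (fun Ans i =>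
    (PySem.List.pyRange 0 k 1).foldl (fun Ans j =>
      let i1 := r - i
      let j1 := s - j
      if i1 < 0 ∨ i1 ≥ n ∨ j1 < 0 ∨ j1 ≥ k then Ans
      else
        let a : Int × Int := (i, j)
        let b : Int × Int := (i1, j1)
        if [a, b] ∈ Ans ∨ [b, a] ∈ Ans ∨ a = b then Ans
        else Ans ++ [[a, b]]) Ans) []

-- ===== PORT B =====
def Rotate180Sym_Eq_alt (x : List (List Int)) (Param : Int × Int) : List (List (Int × Int)) :=
  let n : Int := x.length
  let k : Int := ((PySem.List.pyGet? x 0).getD []).length   -- x[0]; Pre_ excludes x = [] where Python raises IndexError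
  let r : Int := Param.1
  let s : Int := Param.2
  (PySem.List.pyRange 0 n 1).flatMap (fun i =>
    (PySem.List.pyRange 0 k 1).filterMap (fun j =>
      -- Python tuple comparison (i, j) < (r-i, s-j) is lexicographic
      if (0 ≤ r - i ∧ r - i < n ∧ 0 ≤ s - j ∧ s - j < k) ∧
         (i < r - i ∨ (i = r - i ∧ j < s - j)) then
        some [(i, j), (r - i, s - j)]
      else none))

-- ===== PRECONDITION & SPEC =====
-- Pre_ excludes only the empty grid, on which Python's x[0] raises IndexError (in A and in B alike).
def Pre_Rotate180Sym_Eq (x : List (List Int)) (Param : Int × Int) : Prop := x ≠ []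
instance (x : List (List Int)) (Param : Int × Int) : Decidable (Pre_Rotate180Sym_Eq x Param) := by unfold Pre_Rotate180Sym_Eq; infer_instance
def pvWitness_Rotate180Sym_Eq : List (List Int) × (Int × Int) := ([[1, 2], [3, 4]], (1, 1))
def Spec_Rotate180Sym_Eq (x : List (List Int)) (Param : Int × Int) (out : List (List (Int × Int))) : Prop := out = Rotate180Sym_Eq_alt x Param
instance (x : List (List Int)) (Param : Int × Int) (out : List (List (Int × Int))) : Decidable (Spec_Rotate180Sym_Eq x Param out) := by unfold Spec_Rotate180Sym_Eq; infer_instance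

-- ===== CLAIM (what is proved, stated in full; the proofs are below) =====
def Claim_equal_Rotate180Sym_Eq : Prop := ∀ (x : List (List Int)) (Param : Int × Int), Dom_Rotate180Sym_Eq x Param → Pre_Rotate180Sym_Eq x Param → Spec_Rotate180Sym_Eq x Param (Rotate180Sym_Eq x Param)

-- ===== LEMMAS AND PROOFS =====

-- strict lexicographic order on pairs of ints (Python's tuple <)
def pvLexLt (p q : Int × Int) : Prop := p.1 < q.1 ∨ (p.1 = q.1 ∧ p.2 < q.2)

-- A's inner-loop step, as a function of the cell (i, j)
def pvStepA (n k r s : Int) (Ans : List (List (Int × Int))) (p : Int × Int) : List (List (Int × Int)) :=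
  if r - p.1 < 0 ∨ r - p.1 ≥ n ∨ s - p.2 < 0 ∨ s - p.2 ≥ k then Ans
  else if [(p.1, p.2), (r - p.1, s - p.2)] ∈ Ans ∨ [(r - p.1, s - p.2), (p.1, p.2)] ∈ Ans ∨ ((p.1, p.2) : Int × Int) = (r - p.1, s - p.2) then Ans
  else Ans ++ [[(p.1, p.2), (r - p.1, s - p.2)]]

-- B's per-cell emitter
def pvB (n k r s : Int) (p : Int × Int) : Option (List (Int × Int)) :=
  if (0 ≤ r - p.1 ∧ r - p.1 < n ∧ 0 ≤ s - p.2 ∧ s - p.2 < k) ∧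
     (p.1 < r - p.1 ∨ (p.1 = r - p.1 ∧ p.2 < s - p.2)) then
    some [(p.1, p.2), (r - p.1, s - p.2)]
  else none

-- the grid cells in row-major (lexicographic) order
def pvPts (n k : Int) : List (Int × Int) :=
  (PySem.List.pyRange 0 n 1).flatMap (fun i => (PySem.List.pyRange 0 k 1).map (fun j => (i, j)))

lemma pvFoldl_flatMap {α β γ : Type} (l : List α) (g : α → List β) (f : γ → β → γ) (init : γ) :
    (l.flatMap g).foldl f init = l.foldl (fun acc a => (g a).foldl f acc) init := by
  induction l generalizing init with
  | nil => rfl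
  | cons a t ih => simp [List.flatMap_cons, List.foldl_append, ih]

lemma pvFilterMap_flatMap {α β γ : Type} (l : List α) (g : α → List β) (f : β → Option γ) :
    (l.flatMap g).filterMap f = l.flatMap (fun a => (g a).filterMap f) := by
  induction l with
  | nil => rfl
  | cons a t ih => simp [List.flatMap_cons, List.filterMap_append, ih]

lemma pvMem_pts (n k a b : Int) :
    ((a, b) : Int × Int) ∈ pvPts n k ↔ 0 ≤ a ∧ a < n ∧ 0 ≤ b ∧ b < k := by
  simp only [pvPts, List.mem_flatMap, List.mem_map, PySem.List.mem_pyRange_one, Prod.mk.injEq]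
  constructor
  · rintro ⟨i, ⟨h1, h2⟩, j, ⟨h3, h4⟩, rfl, rfl⟩; exact ⟨h1, h2, h3, h4⟩
  · rintro ⟨h1, h2, h3, h4⟩; exact ⟨a, ⟨h1, h2⟩, b, ⟨h3, h4⟩, rfl, rfl⟩

lemma pvPairwise_pts (n k : Int) : (pvPts n k).Pairwise pvLexLt := by
  unfold pvPts
  apply List.pairwise_flatMap.mpr
  refine ⟨?_, ?_⟩
  · intro i _
    exact (PySem.List.pairwise_lt_pyRange_one 0 k).map _ (fun a b h => Or.inr ⟨rfl, h⟩)
  · refine (PySem.List.pairwise_lt_pyRange_one 0 n).imp ?_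
    intro i i' h q hq q' hq'
    simp only [List.mem_map] at hq hq'
    obtain ⟨j, -, rfl⟩ := hq
    obtain ⟨j', -, rfl⟩ := hq'
    exact Or.inl h

-- If pts = pre ++ p :: post then membership in pre is exactly "in the grid and lex-before p"
lemma pvMem_pre_iff {n k : Int} {pre post : List (Int × Int)} {p : Int × Int}
    (hsplit : pvPts n k = pre ++ p :: post) (q : Int × Int) :
    q ∈ pre ↔ q ∈ pvPts n k ∧ pvLexLt q p := by
  have hpw := pvPairwise_pts n k
  rw [hsplit] at hpw
  rw [List.pairwise_append] at hpw
  obtain ⟨hpre, hrest, hcross⟩ := hpw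
  constructor
  · intro hq
    refine ⟨by rw [hsplit]; exact List.mem_append_left _ hq, hcross q hq p (by simp)⟩
  · rintro ⟨hmem, hlt⟩
    rw [hsplit] at hmem
    rcases List.mem_append.mp hmem with h | h
    · exact h
    · rcases List.mem_cons.mp h with rfl | h
      · exfalso; obtain ⟨a, b⟩ := q; unfold pvLexLt at hlt; simp at hlt
      · exfalso
        have := (List.pairwise_cons.mp hrest).1 q h
        obtain ⟨a, b⟩ := q; obtain ⟨c, d⟩ := p
        unfold pvLexLt at hlt this; simp at hlt this; omega

lemma pvNotMem_pre {n k : Int} {pre post : List (Int × Int)} {p : Int × Int}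
    (hsplit : pvPts n k = pre ++ p :: post) : p ∉ pre := by
  intro h
  have := ((pvMem_pre_iff hsplit p).mp h).2
  obtain ⟨a, b⟩ := p; unfold pvLexLt at this; simp at this

-- characterisation of membership in B's accumulated output
lemma pvMem_filterMap_B {n k r s : Int} {L : List (Int × Int)} {v : List (Int × Int)} :
    v ∈ L.filterMap (pvB n k r s) ↔
      ∃ qa qb : Int, (qa, qb) ∈ L ∧ ((0 ≤ r - qa ∧ r - qa < n ∧ 0 ≤ s - qb ∧ s - qb < k) ∧
        (qa < r - qa ∨ (qa = r - qa ∧ qb < s - qb))) ∧ v = [(qa, qb), (r - qa, s - qb)] := by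
  rw [List.mem_filterMap]
  constructor
  · rintro ⟨⟨qa, qb⟩, hq, hv⟩
    unfold pvB at hv
    split at hv
    · exact ⟨qa, qb, hq, by assumption, (Option.some_inj.mp hv).symm⟩
    · exact absurd hv (by simp)
  · rintro ⟨qa, qb, hq, hc, rfl⟩
    exact ⟨(qa, qb), hq, by unfold pvB; rw [if_pos hc]⟩

-- the key step: on the head of the remaining cells, A's step appends exactly B's emission
lemma pvStep_eq {n k r s : Int} {pre post : List (Int × Int)} {p : Int × Int}
    (hsplit : pvPts n k = pre ++ p :: post) :
    pvStepA n k r s (pre.filterMap (pvB n k r s)) p =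
      pre.filterMap (pvB n k r s) ++ (pvB n k r s p).toList := by
  obtain ⟨a, b⟩ := p
  have hmemp : (a, b) ∈ pvPts n k := by rw [hsplit]; simp
  have hpgrid := (pvMem_pts n k a b).mp hmemp
  unfold pvStepA
  simp only
  split_ifs with hbound hguard
  · -- out of bounds: A skips, B emits nothing
    have hB : pvB n k r s (a, b) = none := by
      unfold pvB
      rw [if_neg (show ¬((0 ≤ r - a ∧ r - a < n ∧ 0 ≤ s - b ∧ s - b < k) ∧
        (a < r - a ∨ (a = r - a ∧ b < s - b))) by omega)]
    simp [hB]
  · -- in bounds, A's dedup guard fired: B emits nothing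
    have hB : pvB n k r s (a, b) = none := by
      unfold pvB
      rw [if_neg]
      show ¬((0 ≤ r - a ∧ r - a < n ∧ 0 ≤ s - b ∧ s - b < k) ∧
        (a < r - a ∨ (a = r - a ∧ b < s - b)))
      rintro ⟨-, hlt⟩
      rcases hguard with h | h | h
      · rcases pvMem_filterMap_B.mp h with ⟨qa, qb, hq, -, heq⟩
        simp only [List.cons.injEq, Prod.mk.injEq] at heq
        have e1 : qa = a ∧ qb = b := by omega
        obtain ⟨rfl, rfl⟩ := e1
        exact pvNotMem_pre hsplit hq
      · rcases pvMem_filterMap_B.mp h with ⟨qa, qb, hq, ⟨-, hqlt⟩, heq⟩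
        simp only [List.cons.injEq, Prod.mk.injEq] at heq
        omega
      · simp only [Prod.mk.injEq] at h
        omega
    simp [hB]
  · -- in bounds, guard did not fire: A appends, B emits the same pair
    have hlt : a < r - a ∨ (a = r - a ∧ b < s - b) := by
      by_contra hnlt
      by_cases heq : ((a, b) : Int × Int) = (r - a, s - b)
      · exact hguard (Or.inr (Or.inr heq))
      · simp only [Prod.mk.injEq] at heq
        refine hguard (Or.inr (Or.inl ?_))
        have hqmem : ((r - a, s - b) : Int × Int) ∈ pre := by
          rw [pvMem_pre_iff hsplit]
          refine ⟨(pvMem_pts n k _ _).mpr (by omega), ?_⟩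
          unfold pvLexLt
          show r - a < a ∨ (r - a = a ∧ s - b < b)
          omega
        apply pvMem_filterMap_B.mpr
        refine ⟨r - a, s - b, hqmem, ⟨by omega, by omega⟩, ?_⟩
        rw [show r - (r - a) = a by omega, show s - (s - b) = b by omega]
    have hB : pvB n k r s (a, b) = some [(a, b), (r - a, s - b)] := by
      unfold pvB
      rw [if_pos (show ((0 ≤ r - a ∧ r - a < n ∧ 0 ≤ s - b ∧ s - b < k) ∧
        (a < r - a ∨ (a = r - a ∧ b < s - b))) from ⟨by omega, hlt⟩)]
    simp [hB]

lemma pvMain (n k r s : Int) : ∀ (post pre : List (Int × Int)), pvPts n k = pre ++ post →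
    post.foldl (pvStepA n k r s) (pre.filterMap (pvB n k r s)) =
      pre.filterMap (pvB n k r s) ++ post.filterMap (pvB n k r s) := by
  intro post
  induction post with
  | nil => intro pre _; simp
  | cons p t ih =>
    intro pre hsplit
    rw [List.foldl_cons, pvStep_eq hsplit]
    have h2 : pvPts n k = (pre ++ [p]) ++ t := by rw [hsplit]; simp
    have hstep : pre.filterMap (pvB n k r s) ++ (pvB n k r s p).toList =
        (pre ++ [p]).filterMap (pvB n k r s) := by
      rw [List.filterMap_append]
      cases h : pvB n k r s p <;> simp [List.filterMap, h]
    rw [hstep, ih (pre ++ [p]) h2, List.filterMap_append]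
    cases h : pvB n k r s p <;> simp [List.filterMap, h]

-- ===== VERDICT (by name: the statement is the Claim_ definition above) =====
theorem Rotate180Sym_Eq_spec : Claim_equal_Rotate180Sym_Eq := by
  intro x Param _ _
  show Rotate180Sym_Eq x Param = Rotate180Sym_Eq_alt x Param
  unfold Rotate180Sym_Eq Rotate180Sym_Eq_alt
  set n : Int := (x.length : Int) with hn
  set k : Int := (((PySem.List.pyGet? x 0).getD []).length : Int) with hk
  set r : Int := Param.1
  set s : Int := Param.2
  have hA : (PySem.List.pyRange 0 n 1).foldl (fun Ans i =>
      (PySem.List.pyRange 0 k 1).foldl (fun Ans j =>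
        pvStepA n k r s Ans (i, j)) Ans) ([] : List (List (Int × Int))) =
      (pvPts n k).foldl (pvStepA n k r s) [] := by
    unfold pvPts
    rw [pvFoldl_flatMap]
    simp only [List.foldl_map]
  have hB : (pvPts n k).filterMap (pvB n k r s) =
      (PySem.List.pyRange 0 n 1).flatMap (fun i =>
        (PySem.List.pyRange 0 k 1).filterMap (fun j => pvB n k r s (i, j))) := by
    unfold pvPts
    rw [pvFilterMap_flatMap]
    simp only [List.filterMap_map, Function.comp_def]
  have hmain := pvMain n k r s (pvPts n k) [] (by simp)
  simp only [List.filterMap_nil, List.nil_append] at hmain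
  calc _ = (pvPts n k).foldl (pvStepA n k r s) [] := by
            rw [← hA]; rfl
      _ = (pvPts n k).filterMap (pvB n k r s) := hmain
      _ = _ := by rw [hB]; rfl
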